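-- pv_equiv track=rewrite | github.com/dansuh17/dansuh_algorithms | python/number_block.py | numberBlock
-- ===== SOURCE A (Python) =====
-- def numberBlock(begin, end):
--     # finding the largest integer denominator
--     max_candidate = 10000000
--     to_know = end - begin + 1
--     block_signs = [0] * to_know
--     block_nums = set(range(begin, end + 1))
--
--     for test_int in range(max_candidate, 0, -1):
--         to_remove = []
--         for block_num in block_nums:
--             if block_num % test_int == 0:
--                 block_signs[block_num - begin] = test_int
--                 to_remove.append(block_num)
--
--         for r in to_remove:
--             block_nums.remove(r)
--
--         if len(block_nums) == 0:
--             break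
--
--     return block_signs
-- ===== SOURCE B (Python) =====
-- def numberBlock(begin, end):
--     # per-number sqrt(|n|) divisor enumeration instead of A's 10^7-long countdown over a shrinking set
--     LIMIT = 10000000
--
--     def largest_div(n):
--         m = abs(n)
--         if m == 0:
--             return LIMIT
--         if m <= LIMIT:
--             return m
--         best = 1
--         i = 1
--         while i * i <= m:
--             if m % i == 0:
--                 if i <= LIMIT and i > best:
--                     best = i
--                 q = m // i
--                 if q <= LIMIT and q > best:
--                     best = q
--             i += 1
--         return best
--
--     return [largest_div(n) for n in range(begin, end + 1)]
-- ===== Notes on version B (the rewrite author's own statement) =====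
-- stated objective: alternative
-- what changed: Instead of counting test divisors down from 10^7 over a shrinking set of all numbers, B computes for each number independently its largest divisor <= 10^7 by enumerating divisor pairs up to sqrt(|n|) (with direct answers for 0 and |n| <= 10^7).
import Mathlib
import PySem

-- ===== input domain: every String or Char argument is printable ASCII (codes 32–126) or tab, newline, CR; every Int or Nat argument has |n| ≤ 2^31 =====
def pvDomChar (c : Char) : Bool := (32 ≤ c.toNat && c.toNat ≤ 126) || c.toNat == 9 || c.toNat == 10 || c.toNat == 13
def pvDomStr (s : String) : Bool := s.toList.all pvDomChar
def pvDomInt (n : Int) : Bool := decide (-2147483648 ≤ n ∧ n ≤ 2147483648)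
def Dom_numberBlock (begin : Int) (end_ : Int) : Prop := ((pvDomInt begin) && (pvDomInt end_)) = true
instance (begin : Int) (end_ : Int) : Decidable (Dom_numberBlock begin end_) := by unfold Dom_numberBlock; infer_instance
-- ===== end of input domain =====

-- B replaces A's 10^7-long countdown over a shrinking set with a per-number √n divisor
-- enumeration (largest divisor ≤ 10^7 of each number); same return value, different algorithm.

-- ===== PORT A =====

-- The inner `for block_num in block_nums` pass: updates `block_signs` and collects
-- `to_remove`, in the set's element order (the result does not depend on that order:
-- each member writes its own distinct cell, and the removals commute).
-- `List.set (n - begin).toNat` is exact for every state `numberBlock` reaches: each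
-- `n ∈ nums` satisfies `begin ≤ n ≤ end_`, so the Python index `n - begin` is
-- non-negative and in range.
def aScan (begin : Int) (t : Int) (nums : List Int) (signs : List Int) :
    List Int × List Int :=
  nums.foldl
    (fun st n =>
      if PySem.Int.mod n t = 0 then (st.1.set (n - begin).toNat t, st.2 ++ [n])
      else st)
    (signs, [])

-- `for r in to_remove: block_nums.remove(r)`; every removed element is a member of the
-- set on the reached states, so the KeyError branch (`getD` keeping the set) never fires.
def aRemove (nums : PySem.Set Int) (rem : List Int) : PySem.Set Int :=
  rem.foldl (fun acc r => (PySem.Set.remove? acc r).getD acc) nums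

-- `for test_int in range(max_candidate, 0, -1): … if len(block_nums) == 0: break`;
-- fuel counts the remaining test values, `test_int = fuel + 1` at each step.
def aLoop (begin : Int) : Nat → List Int → PySem.Set Int → List Int
  | 0, signs, _ => signs
  | fuel + 1, signs, nums =>
    let p := aScan begin ((fuel : Int) + 1) nums signs
    let nums' := aRemove nums p.2
    if nums'.length = 0 then p.1 else aLoop begin fuel p.1 nums'

def numberBlock (begin : Int) (end_ : Int) : List Int :=
  let to_know := end_ - begin + 1
  let signs := List.replicate to_know.toNat (0 : Int)   -- [0] * to_know
  let nums := PySem.Set.ofList (PySem.List.pyRange begin (end_ + 1) 1)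
  aLoop begin 10000000 signs nums

-- ===== PORT B =====

-- the `while i * i <= m` loop of Source B's largest_div
def bLoop (m : Nat) (i : Nat) (best : Nat) : Nat :=
  if _h : i * i ≤ m then
    let best' :=
      if m % i = 0 then
        let b1 := if i ≤ 10000000 ∧ best < i then i else best
        let q := m / i
        if q ≤ 10000000 ∧ b1 < q then q else b1
      else best
    bLoop m (i + 1) best'
  else best
termination_by m + 1 - i * i
decreasing_by
  have h2 : i * i < (i + 1) * (i + 1) := by nlinarith
  exact Nat.sub_lt_sub_left (Nat.lt_succ_of_le _h) h2

def largestDiv (n : Int) : Int :=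
  let m := n.natAbs
  if m = 0 then 10000000
  else if m ≤ 10000000 then (m : Int)
  else (bLoop m 1 1 : Int)

def numberBlock_alt (begin : Int) (end_ : Int) : List Int :=
  (PySem.List.pyRange begin (end_ + 1) 1).map largestDiv

-- ===== PRECONDITION & SPEC =====
def Spec_numberBlock (begin : Int) (end_ : Int) (out : List Int) : Prop := out = numberBlock_alt begin end_
instance (begin : Int) (end_ : Int) (out : List Int) : Decidable (Spec_numberBlock begin end_ out) := by unfold Spec_numberBlock; infer_instance

-- ===== CLAIM (what is proved, stated in full; the proofs are below) =====
def Claim_equal_numberBlock : Prop := ∀ (begin : Int) (end_ : Int), Dom_numberBlock begin end_ → Spec_numberBlock begin end_ (numberBlock begin end_)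

-- ===== LEMMAS AND PROOFS =====

-- the common specification value: the greatest t ∈ [1, 10^7] with t ∣ m
def G (m : Nat) : Nat := Nat.findGreatest (· ∣ m) 10000000

lemma G_pos (m : Nat) : 1 ≤ G m :=
  Nat.le_findGreatest (by norm_num) (one_dvd m)

lemma G_dvd (m : Nat) : G m ∣ m := by
  have h := (Nat.findGreatest_eq_iff (P := (· ∣ m))).1 (rfl : G m = G m)
  exact h.2.1 (by have := G_pos m; omega)

lemma G_le (m : Nat) : G m ≤ 10000000 := Nat.findGreatest_le _

lemma le_G {t m : Nat} (ht : t ≤ 10000000) (hd : t ∣ m) : t ≤ G m :=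
  Nat.le_findGreatest ht hd

-- B-side: the √m loop returns the greatest divisor of m that is ≤ 10^7.
lemma bLoop_spec (m : Nat) (hm : 0 < m) :
    ∀ k i best, m + 1 - i * i = k → 0 < i → best ∣ m → best ≤ 10000000 →
      (∀ d, d ∣ m → d ≤ 10000000 → (d < i ∨ m / d < i) → d ≤ best) →
      bLoop m i best ∣ m ∧ bLoop m i best ≤ 10000000 ∧
        ∀ d, d ∣ m → d ≤ 10000000 → d ≤ bLoop m i best := by
  intro k
  induction k using Nat.strong_induction_on with
  | _ k IH =>
    intro i best hk hi hbd hbL hcov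
    rw [bLoop]
    by_cases hii : i * i ≤ m
    · rw [dif_pos hii]
      have hlt : i * i < (i + 1) * (i + 1) := by nlinarith
      have hk' : m + 1 - (i + 1) * (i + 1) < k := by
        subst hk
        exact Nat.sub_lt_sub_left (Nat.lt_succ_of_le hii) hlt
      set best' :=
        (if m % i = 0 then
          let b1 := if i ≤ 10000000 ∧ best < i then i else best
          let q := m / i
          if q ≤ 10000000 ∧ b1 < q then q else b1
        else best) with hbest'
      have hmono : best ≤ best' := by
        rw [hbest']
        split
        · dsimp only
          split_ifs <;> omega
        · exact le_rfl
      have hbd' : best' ∣ m := by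
        by_cases hmod : m % i = 0
        · have hdvd_i : i ∣ m := Nat.dvd_of_mod_eq_zero hmod
          have hdvd_q : m / i ∣ m := Nat.div_dvd_of_dvd hdvd_i
          rw [hbest', if_pos hmod]
          dsimp only
          split_ifs <;> assumption
        · rw [hbest', if_neg hmod]
          exact hbd
      have hbL' : best' ≤ 10000000 := by
        by_cases hmod : m % i = 0
        · rw [hbest', if_pos hmod]
          dsimp only
          split_ifs <;> omega
        · rw [hbest', if_neg hmod]
          exact hbL
      have hib : m % i = 0 → i ≤ 10000000 → i ≤ best' := by
        intro hmod hiL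
        rw [hbest', if_pos hmod]
        dsimp only
        split_ifs <;> omega
      have hqb : m % i = 0 → m / i ≤ 10000000 → m / i ≤ best' := by
        intro hmod hqL
        rw [hbest', if_pos hmod]
        dsimp only
        split_ifs <;> omega
      have hcov' : ∀ d, d ∣ m → d ≤ 10000000 → (d < i + 1 ∨ m / d < i + 1) → d ≤ best' := by
        intro d hd hdL hsmall
        rcases hsmall with hlt1 | hlt2
        · rcases Nat.lt_succ_iff_lt_or_eq.1 hlt1 with h | heq
          · exact le_trans (hcov d hd hdL (Or.inl h)) hmono
          · subst heq
            exact hib (Nat.mod_eq_zero_of_dvd hd) hdL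
        · rcases Nat.lt_succ_iff_lt_or_eq.1 hlt2 with h | heq
          · exact le_trans (hcov d hd hdL (Or.inr h)) hmono
          · have hdvd_i : i ∣ m := heq ▸ Nat.div_dvd_of_dvd hd
            have hmod : m % i = 0 := Nat.mod_eq_zero_of_dvd hdvd_i
            have hq : m / i = d := by
              rw [← heq, Nat.div_div_self hd (by omega)]
            exact hq ▸ hqb hmod (hq ▸ hdL)
      exact IH _ hk' (i + 1) best' rfl (by omega) hbd' hbL' hcov'
    · rw [dif_neg hii]
      refine ⟨hbd, hbL, fun d hd hdL => ?_⟩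
      have hd0 : 0 < d := Nat.pos_of_dvd_of_pos hd hm
      have hq0 : 0 < m / d := Nat.div_pos (Nat.le_of_dvd hm hd) hd0
      have hmul : d * (m / d) = m := Nat.mul_div_cancel' hd
      have : d < i ∨ m / d < i := by
        by_contra hc
        push Not at hc
        have : i * i ≤ d * (m / d) := Nat.mul_le_mul hc.1 hc.2
        omega
      exact hcov d hd hdL this

lemma largestDiv_eq (n : Int) : largestDiv n = ((G n.natAbs : Nat) : Int) := by
  unfold largestDiv
  by_cases h0 : n.natAbs = 0
  · have hG : G n.natAbs = 10000000 := by
      rw [h0]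
      exact Nat.findGreatest_eq_iff.mpr
        ⟨le_rfl, fun _ => dvd_zero _, fun t ht htL _ => absurd ht (by omega)⟩
    rw [h0] at hG
    simp [h0, hG]
  · by_cases h1 : n.natAbs ≤ 10000000
    · have hG : G n.natAbs = n.natAbs :=
        Nat.findGreatest_eq_iff.mpr
          ⟨h1, fun _ => dvd_refl _,
           fun t ht htL hdvd => absurd (Nat.le_of_dvd (by omega) hdvd) (by omega)⟩
      simp [h0, h1, hG]
    · have hcov : ∀ d, d ∣ n.natAbs → d ≤ 10000000 →
          (d < 1 ∨ n.natAbs / d < 1) → d ≤ 1 := by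
        intro d hd hdL hc
        have hd0 : 0 < d := Nat.pos_of_dvd_of_pos hd (by omega)
        rcases hc with h | h
        · omega
        · have := Nat.div_eq_zero_iff.1 (Nat.lt_one_iff.1 h)
          omega
      have hb := bLoop_spec n.natAbs (by omega) (n.natAbs + 1 - 1 * 1) 1 1 rfl
        one_pos (one_dvd _) (by norm_num) hcov
      have hG : G n.natAbs = bLoop n.natAbs 1 1 :=
        Nat.findGreatest_eq_iff.mpr
          ⟨hb.2.1, fun _ => hb.1,
           fun t ht htL hdvd => absurd (hb.2.2 t hdvd htL) (by omega)⟩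
      simp [h0, h1, hG]

-- A-side helpers ---------------------------------------------------------------

lemma aScan_eq (begin t : Int) (nums : List Int) (signs : List Int) :
    aScan begin t nums signs =
      (nums.foldl
        (fun s n => if PySem.Int.mod n t = 0 then s.set (n - begin).toNat t else s) signs,
       nums.filter (fun n => decide (PySem.Int.mod n t = 0))) := by
  suffices h : ∀ (r : List Int),
      nums.foldl
        (fun st n =>
          if PySem.Int.mod n t = 0 then (st.1.set (n - begin).toNat t, st.2 ++ [n]) else st)
        (signs, r) =
      (nums.foldl
        (fun s n => if PySem.Int.mod n t = 0 then s.set (n - begin).toNat t else s) signs,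
       r ++ nums.filter (fun n => decide (PySem.Int.mod n t = 0))) by
    simpa [aScan] using h []
  induction nums generalizing signs with
  | nil => intro r; simp
  | cons a l ih =>
    intro r
    by_cases hpa : PySem.Int.mod a t = 0 <;>
      simp [hpa, ih, List.append_assoc]

lemma foldSet_length (begin t : Int) (nums : List Int) (signs : List Int) :
    (nums.foldl
      (fun s n => if PySem.Int.mod n t = 0 then s.set (n - begin).toNat t else s)
      signs).length = signs.length := by
  induction nums generalizing signs with
  | nil => rfl
  | cons a l ih =>
    by_cases hpa : PySem.Int.mod a t = 0 <;> simp [hpa, ih]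

lemma foldSet_get (begin t : Int) (nums : List Int) (signs : List Int) (j : Nat)
    (hj : j < signs.length)
    (hb : ∀ n ∈ nums, begin ≤ n ∧ n - begin < (signs.length : Int)) :
    (nums.foldl
      (fun s n => if PySem.Int.mod n t = 0 then s.set (n - begin).toNat t else s)
      signs)[j]? =
    some (if (begin + (j : Int)) ∈ nums ∧ PySem.Int.mod (begin + (j : Int)) t = 0
          then t else signs[j]) := by
  induction nums generalizing signs with
  | nil => simp [List.getElem?_eq_getElem hj]
  | cons a l ih =>
    have hb' : ∀ n ∈ l, begin ≤ n ∧ n - begin < (signs.length : Int) :=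
      fun n hn => hb n (by simp [hn])
    have ha := hb a (by simp)
    set signs' := if PySem.Int.mod a t = 0 then signs.set (a - begin).toNat t else signs
      with hsigns'
    have hlen' : signs'.length = signs.length := by
      rw [hsigns']; split <;> simp
    have hj' : j < signs'.length := hlen' ▸ hj
    have key : signs'[j]'hj' =
        if a = begin + (j : Int) ∧ PySem.Int.mod (begin + (j : Int)) t = 0
        then t else signs[j]'hj := by
      by_cases hpa : PySem.Int.mod a t = 0
      · simp only [hsigns', if_pos hpa, List.getElem_set]
        by_cases hidx : (a - begin).toNat = j
        · have haj : a = begin + (j : Int) := by omega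
          simp [hidx, ← haj, hpa]
        · have haj : ¬(a = begin + (j : Int)) := by omega
          simp [hidx, haj]
      · simp only [hsigns', if_neg hpa]
        by_cases haj : a = begin + (j : Int)
        · simp [← haj, hpa]
        · simp [haj]
    have step : (a :: l).foldl
        (fun s n => if PySem.Int.mod n t = 0 then s.set (n - begin).toNat t else s) signs =
        l.foldl
        (fun s n => if PySem.Int.mod n t = 0 then s.set (n - begin).toNat t else s) signs' := by
      rw [List.foldl_cons]
    rw [step, ih signs' (hlen' ▸ hj') (fun n hn => by
      have := hb' n hn; omega), key]
    by_cases hmem : (begin + (j : Int)) ∈ l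
    · by_cases hpj : PySem.Int.mod (begin + (j : Int)) t = 0
      · simp [hmem, hpj]
      · simp [hmem, hpj]
    · by_cases hpj : PySem.Int.mod (begin + (j : Int)) t = 0 <;>
        by_cases haj : a = begin + (j : Int) <;>
          (simp [hmem, hpj, haj] <;> (intro h; exact absurd h.symm haj))

lemma aRemove_cons (l rem : List Int) (a : Int) (ha : ∀ r ∈ rem, r ≠ a) :
    aRemove (a :: l) rem = a :: aRemove l rem := by
  induction rem generalizing l with
  | nil => rfl
  | cons r rs ih =>
    have hra : r ≠ a := ha r (by simp)
    have hstep : (PySem.Set.remove? (a :: l) r).getD (a :: l) =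
        a :: (PySem.Set.remove? l r).getD l := by
      by_cases hm : r ∈ l
      · rw [PySem.Set.remove?_of_mem (by simp [hm]), PySem.Set.remove?_of_mem hm]
        simp [PySem.Set.discard, hra.symm]
      · have h1 : PySem.Set.remove? (a :: l) r = none := by
          rw [PySem.Set.remove?_eq_none_iff]; simp [hm, hra]
        have h2 : PySem.Set.remove? l r = none := by
          rw [PySem.Set.remove?_eq_none_iff]; exact hm
        simp [h1, h2]
    show aRemove ((PySem.Set.remove? (a :: l) r).getD (a :: l)) rs = _
    rw [hstep]
    exact ih _ (fun x hx => ha x (by simp [hx]))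

lemma aRemove_filter (l : List Int) (p : Int → Bool) (hnd : l.Nodup) :
    aRemove l (l.filter p) = l.filter (fun n => !p n) := by
  induction l with
  | nil => rfl
  | cons a l ih =>
    have hal : a ∉ l := (List.nodup_cons.1 hnd).1
    have hl : l.Nodup := (List.nodup_cons.1 hnd).2
    by_cases hpa : p a = true
    · have : (a :: l).filter p = a :: l.filter p := by simp [hpa]
      rw [this]
      show aRemove ((PySem.Set.remove? (a :: l) a).getD (a :: l)) (l.filter p) = _
      rw [PySem.Set.remove?_of_mem (by simp)]
      have hd : PySem.Set.discard (a :: l) a = l := by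
        simp only [PySem.Set.discard, List.filter_cons]
        rw [if_neg (by simp)]
        exact List.filter_eq_self.2 (fun x hx => by
          simp only [Bool.not_eq_eq_eq_not, Bool.not_true, beq_eq_false_iff_ne, ne_eq]
          exact fun h => hal (h ▸ hx))
      simp only [Option.getD_some, hd]
      rw [ih hl]
      simp [hpa]
    · have : (a :: l).filter p = l.filter p := by simp [hpa]
      rw [this, aRemove_cons l (l.filter p) a
        (fun r hr => fun h => hal (h ▸ (List.mem_of_mem_filter hr))), ih hl]
      simp [hpa]

lemma ofList_nodup {α : Type} [BEq α] [LawfulBEq α] (l : List α) (h : l.Nodup) :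
    PySem.Set.ofList l = l := by
  suffices hgen : ∀ (l : List α) (s : List α), (∀ x ∈ l, x ∉ s) → l.Nodup →
      l.foldl PySem.Set.add s = s ++ l by
    rw [PySem.Set.ofList_eq_foldl]
    simpa using hgen _ [] (by simp) h
  intro l
  induction l with
  | nil => intro s _ _; simp
  | cons a l ih =>
    intro s hs hnd
    have hcont : PySem.Set.contains s a = false := by
      simp only [PySem.Set.contains]
      simpa using hs a (by simp)
    have : PySem.Set.add s a = s ++ [a] := by
      simp only [PySem.Set.add, hcont]; simp
    rw [List.foldl_cons, this, ih (s ++ [a])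
      (fun x hx => by
        simp only [List.mem_append, List.mem_singleton]
        rintro (h1 | rfl)
        · exact hs x (by simp [hx]) h1
        · exact (List.nodup_cons.1 hnd).1 hx)
      (List.nodup_cons.1 hnd).2]
    simp

-- main loop invariant
lemma aLoop_inv (begin end_ : Int) (fuel : Nat) (hfuel : fuel ≤ 10000000)
    (signs : List Int) (nums : List Int)
    (hlen : signs.length = (end_ - begin + 1).toNat)
    (hnums : nums = (PySem.List.pyRange begin (end_ + 1) 1).filter
        (fun n => decide (G n.natAbs ≤ fuel)))
    (hsigns : ∀ (j : Nat) (hj : j < signs.length),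
        signs[j] = if fuel < G (begin + (j : Int)).natAbs
                   then ((G (begin + (j : Int)).natAbs : Nat) : Int) else 0) :
    aLoop begin fuel signs nums =
      (PySem.List.pyRange begin (end_ + 1) 1).map (fun n => ((G n.natAbs : Nat) : Int)) := by
  induction fuel generalizing signs nums with
  | zero =>
    show signs = _
    apply List.ext_getElem
    · simp only [List.length_map, PySem.List.length_pyRange_one, hlen]
      omega
    · intro j h1 h2
      have h2' : j < (PySem.List.pyRange begin (end_ + 1) 1).length := by
        simpa using h2
      rw [List.getElem_map, PySem.List.getElem_pyRange_one]
      have := hsigns j h1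
      rw [this]
      rw [if_pos (by have := G_pos (begin + (j : Int)).natAbs; omega)]
  | succ fuel ih =>
    have hfuel' : fuel ≤ 10000000 := by omega
    have hrng_nodup : (PySem.List.pyRange begin (end_ + 1) 1).Nodup :=
      PySem.List.nodup_pyRange_one _ _
    have hnd : nums.Nodup := hnums ▸ hrng_nodup.filter _
    have hmem_rng : ∀ n, n ∈ PySem.List.pyRange begin (end_ + 1) 1 ↔ begin ≤ n ∧ n < end_ + 1 :=
      fun n => PySem.List.mem_pyRange_one
    -- divisibility reading of the Python `block_num % test_int == 0`
    have hdvd_iff : ∀ n : Int, PySem.Int.mod n ((fuel : Int) + 1) = 0 ↔ (fuel + 1) ∣ n.natAbs := by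
      intro n
      rw [PySem.Int.mod_eq_zero_iff_dvd]
      have hcast : ((fuel : Int) + 1) = ((fuel + 1 : Nat) : Int) := by push_cast; ring
      rw [hcast]
      constructor
      · intro h
        have h2 := Int.natAbs_dvd_natAbs.2 h
        rwa [Int.natAbs_natCast] at h2
      · intro h
        refine Int.natAbs_dvd_natAbs.1 ?_
        rwa [Int.natAbs_natCast]
    -- on the remaining numbers, divisibility by fuel+1 says exactly G = fuel+1
    have hG_iff : ∀ n : Int, G n.natAbs ≤ fuel + 1 →
        ((fuel + 1) ∣ n.natAbs ↔ G n.natAbs = fuel + 1) := by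
      intro n hle
      constructor
      · intro h
        have := le_G (m := n.natAbs) (by omega) h
        omega
      · intro h
        exact h ▸ G_dvd n.natAbs
    rw [aLoop]
    simp only [aScan_eq]
    set t : Int := (fuel : Int) + 1 with ht
    set signs1 := nums.foldl
      (fun s n => if PySem.Int.mod n t = 0 then s.set (n - begin).toNat t else s) signs
      with hsigns1def
    set rem := nums.filter (fun n => decide (PySem.Int.mod n t = 0)) with hremdef
    have hlen1 : signs1.length = signs.length := foldSet_length begin t nums signs
    have hbnd : ∀ n ∈ nums, begin ≤ n ∧ n - begin < (signs.length : Int) := by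
      intro n hn
      have hnr : n ∈ PySem.List.pyRange begin (end_ + 1) 1 :=
        List.mem_of_mem_filter (hnums ▸ hn)
      have := (hmem_rng n).1 hnr
      constructor
      · exact this.1
      · rw [hlen]; omega
    -- new sign table
    have hsigns1 : ∀ (j : Nat) (hj : j < signs1.length),
        signs1[j] = if fuel < G (begin + (j : Int)).natAbs
                    then ((G (begin + (j : Int)).natAbs : Nat) : Int) else 0 := by
      intro j hj
      have hj' : j < signs.length := hlen1 ▸ hj
      have hget := foldSet_get begin t nums signs j hj' hbnd
      have hval : signs1[j] =
          (if (begin + (j : Int)) ∈ nums ∧ PySem.Int.mod (begin + (j : Int)) t = 0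
           then t else signs[j]'hj') := by
        have := hget
        rw [← hsigns1def] at this
        rw [List.getElem?_eq_getElem hj] at this
        exact Option.some.inj this
      rw [hval]
      have hjr : (begin + (j : Int)) ∈ PySem.List.pyRange begin (end_ + 1) 1 := by
        rw [hmem_rng]
        rw [hlen] at hj'
        omega
      have hmemnums : (begin + (j : Int)) ∈ nums ↔ G (begin + (j : Int)).natAbs ≤ fuel + 1 := by
        rw [hnums, List.mem_filter]
        simp [hjr]
      by_cases hC : G (begin + (j : Int)).natAbs = fuel + 1
      · rw [if_pos ⟨hmemnums.2 (by omega),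
          (hdvd_iff _).2 ((hG_iff _ (by omega)).2 hC)⟩]
        rw [if_pos (by omega), hC]
        push_cast [ht]
        ring
      · have hnotC : ¬((begin + (j : Int)) ∈ nums ∧
            PySem.Int.mod (begin + (j : Int)) t = 0) := by
          rintro ⟨hmem, hmod⟩
          exact hC ((hG_iff _ (hmemnums.1 hmem)).1 ((hdvd_iff _).1 hmod))
        rw [if_neg hnotC, hsigns j hj']
        by_cases hgt : fuel + 1 < G (begin + (j : Int)).natAbs
        · rw [if_pos hgt, if_pos (by omega)]
        · rw [if_neg hgt, if_neg (by omega)]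
    -- the removal pass leaves exactly the numbers with G ≤ fuel
    have hnums' : aRemove nums rem =
        (PySem.List.pyRange begin (end_ + 1) 1).filter
          (fun n => decide (G n.natAbs ≤ fuel)) := by
      rw [hremdef, aRemove_filter nums _ hnd, hnums, List.filter_filter]
      apply List.filter_congr
      intro n _
      by_cases hle : G n.natAbs ≤ fuel
      · have hmod : ¬ PySem.Int.mod n t = 0 := by
          intro hmod
          have := le_G (m := n.natAbs) (by omega) ((hdvd_iff n).1 hmod)
          omega
        have hle1 : G n.natAbs ≤ fuel + 1 := by omega
        simp [hle, hle1, hmod]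
      · by_cases hle1 : G n.natAbs ≤ fuel + 1
        · have hC : G n.natAbs = fuel + 1 := by omega
          have : PySem.Int.mod n t = 0 := (hdvd_iff n).2 ((hG_iff n hle1).2 hC)
          simp [hle, hle1, this]
        · simp [hle, hle1]
    by_cases hempty : (aRemove nums rem).length = 0
    · rw [if_pos hempty]
      have hnil : (PySem.List.pyRange begin (end_ + 1) 1).filter
          (fun n => decide (G n.natAbs ≤ fuel)) = [] := by
        rw [← hnums']
        exact List.length_eq_zero_iff.1 hempty
      have hall : ∀ n ∈ PySem.List.pyRange begin (end_ + 1) 1, fuel < G n.natAbs := by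
        intro n hn
        have := List.filter_eq_nil_iff.1 hnil n hn
        simp at this
        omega
      apply List.ext_getElem
      · simp only [List.length_map, PySem.List.length_pyRange_one, hlen1, hlen]
        omega
      · intro j h1 h2
        rw [List.getElem_map, PySem.List.getElem_pyRange_one]
        rw [hsigns1 j h1]
        have hjr : (begin + (j : Int)) ∈ PySem.List.pyRange begin (end_ + 1) 1 := by
          rw [hmem_rng]
          rw [hlen1, hlen] at h1
          omega
        rw [if_pos (hall _ hjr)]
    · rw [if_neg hempty]
      exact ih hfuel' signs1 (aRemove nums rem) (hlen1.trans hlen) hnums' hsigns1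

-- ===== VERDICT (by name: the statement is the Claim_ definition above) =====
theorem numberBlock_spec : Claim_equal_numberBlock := by
  intro begin end_ _
  show numberBlock begin end_ = numberBlock_alt begin end_
  simp only [numberBlock, numberBlock_alt]
  rw [ofList_nodup _ (PySem.List.nodup_pyRange_one _ _)]
  rw [aLoop_inv begin end_ 10000000 le_rfl _ _
      (by simp)
      ((List.filter_eq_self.2 (fun n _ => by simpa using G_le n.natAbs)).symm)
      (fun j hj => by
        rw [List.getElem_replicate,
          if_neg (by have := G_le (begin + (j : Int)).natAbs; omega)])]
  exact List.map_congr_left (fun n _ => (largestDiv_eq n).symm)
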